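-- pv_equiv track=rewrite | github.com/saagpatel/bridge-db | src/bridge_db/migration.py | parse_subsections
-- ===== SOURCE A (Python) =====
-- def parse_subsections(content: str, key_map: dict[str, str]) -> dict[str, str]:
--     """Split on level-3 (###) headings and return {key_map_key: body}."""
--     result: dict[str, str] = {}
--     current_label: str | None = None
--     current_lines: list[str] = []
--
--     for line in content.splitlines():
--         if line.startswith("### "):
--             if current_label is not None:
--                 body = "\n".join(current_lines).strip()
--                 # Match against any prefix of the key_map entries
--                 for label, key in key_map.items():
--                     if current_label.startswith(label):
--                         result[key] = body
--                         break
--             current_label = line[4:].strip()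
--             current_lines = []
--         else:
--             if current_label is not None:
--                 current_lines.append(line)
--
--     # Last subsection
--     if current_label is not None:
--         body = "\n".join(current_lines).strip()
--         for label, key in key_map.items():
--             if current_label.startswith(label):
--                 result[key] = body
--                 break
--
--     return result
-- ===== SOURCE B (Python) =====
-- def parse_subsections(content: str, key_map: dict[str, str]) -> dict[str, str]:
--     """Split on level-3 (###) headings and return {key_map_key: body}.
--
--     Per-heading lookahead: for each '### ' line, collect the body by scanning
--     forward to the next heading; no streaming accumulator state."""
--     lines = content.splitlines()
--     result: dict[str, str] = {}
--     for i, line in enumerate(lines):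
--         if line.startswith("### "):
--             body_lines = []
--             for nxt in lines[i + 1:]:
--                 if nxt.startswith("### "):
--                     break
--                 body_lines.append(nxt)
--             label = line[4:].strip()
--             body = "\n".join(body_lines).strip()
--             for prefix, key in key_map.items():
--                 if label.startswith(prefix):
--                     result[key] = body
--                     break
--     return result
-- ===== Notes on version B (the rewrite author's own statement) =====
-- stated objective: alternative
-- what changed: Replaces A's streaming state machine (current_label/current_lines accumulator with a duplicated final-flush block) by a stateless per-heading lookahead: for each '### ' line, the body is collected by scanning forward to the next heading, so there is no carried state and no duplicated flush code.
import Mathlib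
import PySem

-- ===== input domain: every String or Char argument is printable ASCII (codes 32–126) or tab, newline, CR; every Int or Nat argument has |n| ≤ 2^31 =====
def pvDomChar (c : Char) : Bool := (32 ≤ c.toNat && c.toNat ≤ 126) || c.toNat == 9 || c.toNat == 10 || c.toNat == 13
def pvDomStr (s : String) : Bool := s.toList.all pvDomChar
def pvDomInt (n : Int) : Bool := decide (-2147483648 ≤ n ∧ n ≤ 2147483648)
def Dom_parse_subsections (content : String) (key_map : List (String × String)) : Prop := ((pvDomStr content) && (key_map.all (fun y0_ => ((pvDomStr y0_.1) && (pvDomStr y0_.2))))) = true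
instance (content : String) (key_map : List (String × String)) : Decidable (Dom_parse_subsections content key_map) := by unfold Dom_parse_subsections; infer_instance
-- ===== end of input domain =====

-- B replaces A's streaming accumulator state machine by a per-heading lookahead
-- (for each '### ' line, collect the body by scanning forward to the next heading);
-- objective: alternative decomposition. Equivalence is about the return value.

-- ===== PORT A =====

-- A's inner 'for label, key in key_map.items(): if current_label.startswith(label): result[key] = body; break'
def pyMatchA (key_map : List (String × String)) (current_label body : String)
    (result : PySem.Dict String String) : PySem.Dict String String :=
  match key_map with
  | [] => result
  | (label, key) :: rest =>
    if PySem.Str.startswith current_label label then result.insert key body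
    else pyMatchA rest current_label body result

def parse_subsections (content : String) (key_map : List (String × String)) : List (String × String) :=
  let st := (PySem.Str.splitlines content).foldl
    (fun (st : PySem.Dict String String × Option String × List String) line =>
      if PySem.Str.startswith line "### " then
        let result :=
          match st.2.1 with
          | some cl => pyMatchA key_map cl (PySem.Str.strip (PySem.Str.join "\n" st.2.2)) st.1
          | none => st.1
        (result, some (PySem.Str.strip (PySem.Str.slice line (some 4) none)), ([] : List String))
      else
        match st.2.1 with
        | some _ => (st.1, st.2.1, st.2.2 ++ [line])
        | none => st)
    ((PySem.Dict.empty : PySem.Dict String String), (none : Option String), ([] : List String))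
  (match st.2.1 with
   | some cl => pyMatchA key_map cl (PySem.Str.strip (PySem.Str.join "\n" st.2.2)) st.1
   | none => st.1).items

-- ===== PORT B =====

-- B's inner 'for nxt in lines[i+1:]: if nxt.startswith("### "): break; body_lines.append(nxt)'
def collectBodyB (lines : List String) : List String :=
  match lines with
  | [] => []
  | x :: xs => if PySem.Str.startswith x "### " then [] else x :: collectBodyB xs

-- B's inner 'for prefix, key in key_map.items(): if label.startswith(prefix): result[key] = body; break'
def pyMatchB (key_map : List (String × String)) (label body : String)
    (result : PySem.Dict String String) : PySem.Dict String String :=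
  match key_map with
  | [] => result
  | (pfx, key) :: rest =>
    if PySem.Str.startswith label pfx then result.insert key body
    else pyMatchB rest label body result

def parse_subsections_alt (content : String) (key_map : List (String × String)) : List (String × String) :=
  let lines := PySem.Str.splitlines content
  ((PySem.List.enumerate lines).foldl
    (fun (result : PySem.Dict String String) (p : Int × String) =>
      if PySem.Str.startswith p.2 "### " then
        let body_lines := collectBodyB (PySem.List.slice lines (some (p.1 + 1)) none)
        let label := PySem.Str.strip (PySem.Str.slice p.2 (some 4) none)
        let body := PySem.Str.strip (PySem.Str.join "\n" body_lines)
        pyMatchB key_map label body result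
      else result)
    PySem.Dict.empty).items

-- ===== PRECONDITION & SPEC =====
def Spec_parse_subsections (content : String) (key_map : List (String × String)) (out : List (String × String)) : Prop := out = parse_subsections_alt content key_map
instance (content : String) (key_map : List (String × String)) (out : List (String × String)) : Decidable (Spec_parse_subsections content key_map out) := by unfold Spec_parse_subsections; infer_instance

-- ===== CLAIM (what is proved, stated in full; the proofs are below) =====
def Claim_equal_parse_subsections : Prop := ∀ (content : String) (key_map : List (String × String)), Dom_parse_subsections content key_map → Spec_parse_subsections content key_map (parse_subsections content key_map)

-- ===== LEMMAS AND PROOFS =====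

-- the ordered list of (heading line, body lines) segments of a line list
def segsOf (lines : List String) : List (String × List String) :=
  match lines with
  | [] => []
  | x :: xs =>
    if PySem.Str.startswith x "### " then (x, collectBodyB xs) :: segsOf xs else segsOf xs

-- assign the segments into the dict, in order, first key_map prefix match each
def foldSegs (key_map : List (String × String)) (r : PySem.Dict String String)
    (ss : List (String × List String)) : PySem.Dict String String :=
  ss.foldl (fun r s =>
    pyMatchA key_map (PySem.Str.strip (PySem.Str.slice s.1 (some 4) none))
      (PySem.Str.strip (PySem.Str.join "\n" s.2)) r) r

theorem pyMatchB_eq (key_map : List (String × String)) (l b : String)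
    (r : PySem.Dict String String) : pyMatchB key_map l b r = pyMatchA key_map l b r := by
  induction key_map generalizing r with
  | nil => rfl
  | cons p rest ih => simp only [pyMatchB, pyMatchA]; split <;> simp [ih]

-- A's fold-with-final-flush equals foldSegs over the segments
theorem A_inv (key_map : List (String × String)) (lines : List String)
    (r : PySem.Dict String String) (cl : Option String) (buf : List String) :
    (let st := lines.foldl
      (fun (st : PySem.Dict String String × Option String × List String) line =>
        if PySem.Str.startswith line "### " then
          let result :=
            match st.2.1 with
            | some cl => pyMatchA key_map cl (PySem.Str.strip (PySem.Str.join "\n" st.2.2)) st.1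
            | none => st.1
          (result, some (PySem.Str.strip (PySem.Str.slice line (some 4) none)), ([] : List String))
        else
          match st.2.1 with
          | some _ => (st.1, st.2.1, st.2.2 ++ [line])
          | none => st) (r, cl, buf)
     match st.2.1 with
     | some c => pyMatchA key_map c (PySem.Str.strip (PySem.Str.join "\n" st.2.2)) st.1
     | none => st.1)
    = match cl with
      | some l => foldSegs key_map
          (pyMatchA key_map l (PySem.Str.strip (PySem.Str.join "\n" (buf ++ collectBodyB lines))) r)
          (segsOf lines)
      | none => foldSegs key_map r (segsOf lines) := by
  induction lines generalizing r cl buf with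
  | nil => cases cl <;> simp [segsOf, foldSegs, collectBodyB]
  | cons x xs ih =>
    by_cases hx : PySem.Str.startswith x "### " = true
    · cases cl with
      | none =>
        simp only [List.foldl_cons, hx, if_pos, ih, segsOf, foldSegs, collectBodyB,
          List.nil_append, List.foldl_cons]
      | some l =>
        simp only [List.foldl_cons, hx, if_pos, ih, segsOf, foldSegs, collectBodyB,
          List.append_nil, List.nil_append, List.foldl_cons]
    · cases cl with
      | none =>
        simp only [List.foldl_cons, hx, if_neg, ih, segsOf, collectBodyB]
        simp [hx]
      | some l =>
        simp only [List.foldl_cons, hx, if_neg, ih, segsOf, collectBodyB]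
        simp [hx, List.append_assoc]

-- B's enumerate fold equals foldSegs over the segments of the processed suffix
theorem B_inv (key_map : List (String × String)) (lines : List String) :
    ∀ (suf : List String) (k : Nat), lines.drop k = suf →
    ∀ (r : PySem.Dict String String),
    (PySem.List.enumerate suf (k : Int)).foldl
      (fun (result : PySem.Dict String String) (p : Int × String) =>
        if PySem.Str.startswith p.2 "### " then
          let body_lines := collectBodyB (PySem.List.slice lines (some (p.1 + 1)) none)
          let label := PySem.Str.strip (PySem.Str.slice p.2 (some 4) none)
          let body := PySem.Str.strip (PySem.Str.join "\n" body_lines)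
          pyMatchB key_map label body result
        else result) r
    = foldSegs key_map r (segsOf suf) := by
  intro suf
  induction suf with
  | nil => intro k hk r; simp [PySem.List.enumerate_nil, segsOf, foldSegs]
  | cons x xs ih =>
    intro k hk r
    have hdrop : lines.drop (k + 1) = xs := by
      have := congrArg List.tail hk
      simpa [List.tail_drop] using this
    have hcast : ((k : Int) + 1) = ((k + 1 : Nat) : Int) := by push_cast; ring
    rw [PySem.List.enumerate_cons, List.foldl_cons]
    by_cases hx : PySem.Str.startswith x "### " = true
    · simp only [hx, if_pos, hcast, PySem.List.slice_from_natCast, hdrop]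
      rw [ih (k + 1) hdrop]
      simp only [segsOf]
      rw [if_pos hx]
      simp only [foldSegs, List.foldl_cons, pyMatchB_eq]
    · simp only [hx, Bool.false_eq_true, if_false, hcast]
      rw [ih (k + 1) hdrop]
      simp only [segsOf]
      rw [if_neg hx]

-- ===== VERDICT (by name: the statement is the Claim_ definition above) =====
theorem parse_subsections_spec : Claim_equal_parse_subsections := by
  intro content key_map _
  have hA := A_inv key_map (PySem.Str.splitlines content) PySem.Dict.empty none []
  have hB := B_inv key_map (PySem.Str.splitlines content) (PySem.Str.splitlines content) 0 rfl
    PySem.Dict.empty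
  exact (congrArg PySem.Dict.items hA).trans (congrArg PySem.Dict.items hB).symm
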